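-- pv_equiv track=rewrite | github.com/cendes/knob_graph_search | python_prototype/check_expression.py | check_mismatched_parenthesis
-- ===== SOURCE A (Python) =====
-- def check_mismatched_parenthesis(var_ref, curr_index, has_recurred):
--     while curr_index < len(var_ref):
--         if var_ref[curr_index] == "(":
--             curr_index += 1
--             while curr_index < len(var_ref) and var_ref[curr_index] != ")":
--                 if var_ref[curr_index] == "(":
--                     mismatched_parenthesis, curr_index = check_mismatched_parenthesis(var_ref, curr_index, True)
--                     if mismatched_parenthesis:
--                         return True, curr_index
--                 curr_index += 1
--             if curr_index == len(var_ref) or var_ref[curr_index] != ")":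
--                 return True, curr_index
--             elif has_recurred:
--                 return False, curr_index
--             curr_index += 1
--         elif var_ref[curr_index] == ")":
--             return True, curr_index
--         else:
--             curr_index += 1
--     return False, curr_index
-- ===== SOURCE B (Python) =====
-- def check_mismatched_parenthesis(var_ref, curr_index, has_recurred):
--     i = curr_index
--     depth = 0
--     n = len(var_ref)
--     while i < n:
--         c = var_ref[i]
--         if c == "(":
--             depth += 1
--         elif c == ")":
--             if depth == 0:
--                 return True, i
--             depth -= 1
--             if depth == 0 and has_recurred:
--                 return False, i
--         i += 1
--     return depth > 0, i
-- ===== Notes on version B (the rewrite author's own statement) =====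
-- stated objective: simpler
-- what changed: Replaced A's recursion with a nested inner while-loop by one iterative left-to-right scan that maintains a single integer depth counter.
import Mathlib
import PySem

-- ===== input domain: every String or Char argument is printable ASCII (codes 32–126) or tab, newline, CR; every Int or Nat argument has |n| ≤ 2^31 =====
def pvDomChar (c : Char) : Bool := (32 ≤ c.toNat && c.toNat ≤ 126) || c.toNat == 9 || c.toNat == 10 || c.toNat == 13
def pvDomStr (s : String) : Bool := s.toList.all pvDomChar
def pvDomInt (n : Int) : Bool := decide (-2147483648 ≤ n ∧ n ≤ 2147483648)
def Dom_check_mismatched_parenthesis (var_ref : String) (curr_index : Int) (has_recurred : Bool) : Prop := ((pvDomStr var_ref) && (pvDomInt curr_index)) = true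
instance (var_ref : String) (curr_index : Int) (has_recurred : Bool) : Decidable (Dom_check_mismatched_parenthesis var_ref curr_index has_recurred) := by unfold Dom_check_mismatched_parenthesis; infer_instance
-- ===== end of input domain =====

-- termination measure lemma for goB (cited by name in its decreasing_by)
theorem pvMeasureLt (len i : Int) (hi : i < len) : (len - (i + 1)).toNat < (len - i).toNat := by
  omega

-- B replaces A's recursion (and its nested inner while-loop) by one iterative scan with an
-- integer depth counter; same cost class, plainer control flow (objective: simpler).

-- ===== PORT A =====
-- A's outer while-loop (goOuterA) and inner while-loop (goInnerA), fuel-guarded (the fuel is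
-- only a totality guard; the fixed fuel below is proved sufficient whenever Python A returns).
-- `none` = IndexError (pyGet? on an index below -len) or fuel exhaustion.
mutual
def goOuterA : Nat → List Char → Int → Bool → Option (Bool × Int)
  | 0, _, _, _ => none
  | f + 1, s, i, h =>
    if i < (s.length : Int) then
      match PySem.List.pyGet? s i with
      | none => none
      | some c =>
        if c = '(' then goInnerA f s (i + 1) h
        else if c = ')' then some (true, i)
        else goOuterA f s (i + 1) h
    else some (false, i)

def goInnerA : Nat → List Char → Int → Bool → Option (Bool × Int)
  | 0, _, _, _ => none
  | f + 1, s, i, h =>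
    if i < (s.length : Int) then
      match PySem.List.pyGet? s i with
      | none => none
      | some c =>
        if c = ')' then
          -- inner while-loop exits; "curr_index == len" is false here, char is ')'
          if h then some (false, i) else goOuterA f s (i + 1) h
        else if c = '(' then
          match goOuterA f s i true with
          | none => none
          | some (true, j) => some (true, j)
          | some (false, j) => goInnerA f s (j + 1) h
        else goInnerA f s (i + 1) h
    else some (true, i)  -- ran off the end inside the inner loop: mismatched
end

def check_mismatched_parenthesis (var_ref : String) (curr_index : Int) (has_recurred : Bool) : Bool × Int :=
  (goOuterA (2 * ((var_ref.toList.length : Int) - curr_index).toNat + 1)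
      var_ref.toList curr_index has_recurred).getD (true, curr_index)

-- ===== PORT B =====
-- single pass with a depth counter; on an IndexError position (impossible under Pre_) it
-- returns (true, i) as a totality guard.
def goB (s : List Char) (i : Int) (depth : Int) (h : Bool) : Bool × Int :=
  if hi : i < (s.length : Int) then
    match PySem.List.pyGet? s i with
    | none => (true, i)
    | some c =>
      if c = '(' then goB s (i + 1) (depth + 1) h
      else if c = ')' then
        if depth = 0 then (true, i)
        else if depth = 1 ∧ h then (false, i)
        else goB s (i + 1) (depth - 1) h
      else goB s (i + 1) depth h
  else (decide (depth > 0), i)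
termination_by ((s.length : Int) - i).toNat
decreasing_by all_goals exact pvMeasureLt _ _ hi

def check_mismatched_parenthesis_alt (var_ref : String) (curr_index : Int) (has_recurred : Bool) : Bool × Int :=
  goB var_ref.toList curr_index 0 has_recurred

-- ===== PRECONDITION & SPEC =====
-- Pre_ excludes exactly the inputs where Python A raises IndexError (curr_index < -len(var_ref)).
def Pre_check_mismatched_parenthesis (var_ref : String) (curr_index : Int) (has_recurred : Bool) : Prop :=
  -(var_ref.toList.length : Int) ≤ curr_index
instance (var_ref : String) (curr_index : Int) (has_recurred : Bool) : Decidable (Pre_check_mismatched_parenthesis var_ref curr_index has_recurred) := by unfold Pre_check_mismatched_parenthesis; infer_instance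

def pvWitness_check_mismatched_parenthesis : String × Int × Bool := ("(a(b))", 0, false)

def Spec_check_mismatched_parenthesis (var_ref : String) (curr_index : Int) (has_recurred : Bool) (out : Bool × Int) : Prop := out = check_mismatched_parenthesis_alt var_ref curr_index has_recurred
instance (var_ref : String) (curr_index : Int) (has_recurred : Bool) (out : Bool × Int) : Decidable (Spec_check_mismatched_parenthesis var_ref curr_index has_recurred out) := by unfold Spec_check_mismatched_parenthesis; infer_instance

-- ===== CLAIM (what is proved, stated in full; the proofs are below) =====
def Claim_equal_check_mismatched_parenthesis : Prop := ∀ (var_ref : String) (curr_index : Int) (has_recurred : Bool), Dom_check_mismatched_parenthesis var_ref curr_index has_recurred → Pre_check_mismatched_parenthesis var_ref curr_index has_recurred → Spec_check_mismatched_parenthesis var_ref curr_index has_recurred (check_mismatched_parenthesis var_ref curr_index has_recurred)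

-- ===== LEMMAS AND PROOFS =====

-- branch equation lemmas for the three loop functions
theorem goOuterA_get (f : Nat) (s : List Char) (i : Int) (h : Bool) (c : Char)
    (hi : i < (s.length : Int)) (hg : PySem.List.pyGet? s i = some c) :
    goOuterA (f + 1) s i h =
      if c = '(' then goInnerA f s (i + 1) h
      else if c = ')' then some (true, i)
      else goOuterA f s (i + 1) h := by
  rw [goOuterA, if_pos hi, hg]

theorem goOuterA_none (f : Nat) (s : List Char) (i : Int) (h : Bool)
    (hi : i < (s.length : Int)) (hg : PySem.List.pyGet? s i = none) :
    goOuterA (f + 1) s i h = none := by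
  rw [goOuterA, if_pos hi, hg]

theorem goOuterA_end (f : Nat) (s : List Char) (i : Int) (h : Bool)
    (hi : ¬ i < (s.length : Int)) :
    goOuterA (f + 1) s i h = some (false, i) := by
  rw [goOuterA, if_neg hi]

theorem goInnerA_get (f : Nat) (s : List Char) (i : Int) (h : Bool) (c : Char)
    (hi : i < (s.length : Int)) (hg : PySem.List.pyGet? s i = some c) :
    goInnerA (f + 1) s i h =
      if c = ')' then (if h then some (false, i) else goOuterA f s (i + 1) h)
      else if c = '(' then
        (match goOuterA f s i true with
         | none => none
         | some (true, j) => some (true, j)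
         | some (false, j) => goInnerA f s (j + 1) h)
      else goInnerA f s (i + 1) h := by
  rw [goInnerA, if_pos hi, hg]

theorem goInnerA_none (f : Nat) (s : List Char) (i : Int) (h : Bool)
    (hi : i < (s.length : Int)) (hg : PySem.List.pyGet? s i = none) :
    goInnerA (f + 1) s i h = none := by
  rw [goInnerA, if_pos hi, hg]

theorem goInnerA_end (f : Nat) (s : List Char) (i : Int) (h : Bool)
    (hi : ¬ i < (s.length : Int)) :
    goInnerA (f + 1) s i h = some (true, i) := by
  rw [goInnerA, if_neg hi]

theorem goB_get (s : List Char) (i depth : Int) (h : Bool) (c : Char)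
    (hi : i < (s.length : Int)) (hg : PySem.List.pyGet? s i = some c) :
    goB s i depth h =
      if c = '(' then goB s (i + 1) (depth + 1) h
      else if c = ')' then
        (if depth = 0 then (true, i)
         else if depth = 1 ∧ h then (false, i)
         else goB s (i + 1) (depth - 1) h)
      else goB s (i + 1) depth h := by
  rw [goB, dif_pos hi, hg]

theorem goB_none (s : List Char) (i depth : Int) (h : Bool)
    (hi : i < (s.length : Int)) (hg : PySem.List.pyGet? s i = none) :
    goB s i depth h = (true, i) := by
  rw [goB, dif_pos hi, hg]

theorem goB_end (s : List Char) (i depth : Int) (h : Bool)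
    (hi : ¬ i < (s.length : Int)) :
    goB s i depth h = (decide (depth > 0), i) := by
  rw [goB, dif_neg hi]

-- fuel monotonicity for A's port
theorem monoA : ∀ f f' : Nat, f ≤ f' → ∀ (s : List Char) (i : Int) (h : Bool) (r : Bool × Int),
    (goOuterA f s i h = some r → goOuterA f' s i h = some r) ∧
    (goInnerA f s i h = some r → goInnerA f' s i h = some r) := by
  intro f
  induction f with
  | zero => intro f' _ s i h r; constructor <;> intro hc <;> simp [goOuterA, goInnerA] at hc
  | succ f ih =>
    intro f' hf s i h r
    obtain ⟨f'', rfl⟩ : ∃ f'', f' = f'' + 1 := ⟨f' - 1, by omega⟩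
    have hf'' : f ≤ f'' := by omega
    constructor
    · intro hc
      by_cases hi : i < (s.length : Int)
      · cases hg : PySem.List.pyGet? s i with
        | none => rw [goOuterA_none f s i h hi hg] at hc; exact absurd hc (by simp)
        | some c =>
          rw [goOuterA_get f s i h c hi hg] at hc
          rw [goOuterA_get f'' s i h c hi hg]
          by_cases hop : c = '('
          · rw [if_pos hop] at hc ⊢; exact (ih f'' hf'' s (i+1) h r).2 hc
          · by_cases hcl : c = ')'
            · rw [if_neg hop, if_pos hcl] at hc ⊢; exact hc
            · rw [if_neg hop, if_neg hcl] at hc ⊢; exact (ih f'' hf'' s (i+1) h r).1 hc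
      · rw [goOuterA_end f s i h hi] at hc; rw [goOuterA_end f'' s i h hi]; exact hc
    · intro hc
      by_cases hi : i < (s.length : Int)
      · cases hg : PySem.List.pyGet? s i with
        | none => rw [goInnerA_none f s i h hi hg] at hc; exact absurd hc (by simp)
        | some c =>
          rw [goInnerA_get f s i h c hi hg] at hc
          rw [goInnerA_get f'' s i h c hi hg]
          by_cases hcl : c = ')'
          · rw [if_pos hcl] at hc ⊢
            by_cases hh : h = true
            · rw [if_pos hh] at hc ⊢; exact hc
            · rw [if_neg hh] at hc ⊢; exact (ih f'' hf'' s (i+1) h r).1 hc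
          · by_cases hop : c = '('
            · rw [if_neg hcl, if_pos hop] at hc ⊢
              cases hg2 : goOuterA f s i true with
              | none => rw [hg2] at hc; exact absurd hc (by simp)
              | some p =>
                rw [hg2] at hc
                rw [(ih f'' hf'' s i true p).1 hg2]
                obtain ⟨b, j⟩ := p
                cases b
                · exact (ih f'' hf'' s (j+1) h r).2 hc
                · exact hc
            · rw [if_neg hcl, if_neg hop] at hc ⊢; exact (ih f'' hf'' s (i+1) h r).2 hc
      · rw [goInnerA_end f s i h hi] at hc; rw [goInnerA_end f'' s i h hi]; exact hc

-- the returned index is ≥ the starting index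
theorem idxA : ∀ f : Nat, ∀ (s : List Char) (i : Int) (h : Bool) (b : Bool) (j : Int),
    (goOuterA f s i h = some (b, j) → i ≤ j) ∧
    (goInnerA f s i h = some (b, j) → i ≤ j) := by
  intro f
  induction f with
  | zero => intro s i h b j; constructor <;> intro hc <;> simp [goOuterA, goInnerA] at hc
  | succ f ih =>
    intro s i h b j
    constructor
    · intro hc
      by_cases hi : i < (s.length : Int)
      · cases hg : PySem.List.pyGet? s i with
        | none => rw [goOuterA_none f s i h hi hg] at hc; exact absurd hc (by simp)
        | some c =>
          rw [goOuterA_get f s i h c hi hg] at hc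
          by_cases hop : c = '('
          · rw [if_pos hop] at hc; have := (ih s (i+1) h b j).2 hc; omega
          · by_cases hcl : c = ')'
            · rw [if_neg hop, if_pos hcl] at hc
              have := congrArg (·.2) (Option.some.inj hc); simp at this; omega
            · rw [if_neg hop, if_neg hcl] at hc; have := (ih s (i+1) h b j).1 hc; omega
      · rw [goOuterA_end f s i h hi] at hc
        have := congrArg (·.2) (Option.some.inj hc); simp at this; omega
    · intro hc
      by_cases hi : i < (s.length : Int)
      · cases hg : PySem.List.pyGet? s i with
        | none => rw [goInnerA_none f s i h hi hg] at hc; exact absurd hc (by simp)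
        | some c =>
          rw [goInnerA_get f s i h c hi hg] at hc
          by_cases hcl : c = ')'
          · rw [if_pos hcl] at hc
            by_cases hh : h = true
            · rw [if_pos hh] at hc
              have := congrArg (·.2) (Option.some.inj hc); simp at this; omega
            · rw [if_neg hh] at hc; have := (ih s (i+1) h b j).1 hc; omega
          · by_cases hop : c = '('
            · rw [if_neg hcl, if_pos hop] at hc
              cases hg2 : goOuterA f s i true with
              | none => rw [hg2] at hc; exact absurd hc (by simp)
              | some p =>
                rw [hg2] at hc
                obtain ⟨b', j'⟩ := p
                cases b'
                · have h1 := (ih s i true false j').1 hg2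
                  have h2 := (ih s (j'+1) h b j).2 hc
                  omega
                · have h1 := (ih s i true true j').1 hg2
                  have := congrArg (·.2) (Option.some.inj hc); simp at this; omega
            · rw [if_neg hcl, if_neg hop] at hc; have := (ih s (i+1) h b j).2 hc; omega
      · rw [goInnerA_end f s i h hi] at hc
        have := congrArg (·.2) (Option.some.inj hc); simp at this; omega

-- B's depth-shift lemma: a fresh sub-scan at depth e with has_recurred = true, relative to
-- the combined scan at depth d + e.
theorem shiftB : ∀ n : Nat, ∀ (s : List Char) (i : Int), ((s.length : Int) - i).toNat = n →
    ∀ (d e : Int) (h : Bool), 1 ≤ d → 1 ≤ e →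
    (∀ j, goB s i e true = (true, j) → goB s i (d + e) h = (true, j)) ∧
    (∀ j, goB s i e true = (false, j) → goB s i (d + e) h = goB s (j + 1) d h) := by
  intro n
  induction n using Nat.strong_induction_on with
  | _ n ih =>
    intro s i hn d e h hd he
    by_cases hi : i < (s.length : Int)
    · have hrec : ((s.length : Int) - (i + 1)).toNat < n := by omega
      cases hg : PySem.List.pyGet? s i with
      | none =>
        constructor <;> intro j hj <;> rw [goB_none s i e true hi hg] at hj
        · rw [goB_none s i (d + e) h hi hg]; rw [Prod.mk.injEq] at hj ⊢; exact ⟨rfl, hj.2⟩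
        · exact absurd (congrArg (·.1) hj) (by simp)
      | some c =>
        by_cases hop : c = '('
        · constructor <;> intro j hj <;>
            rw [goB_get s i e true c hi hg, if_pos hop] at hj <;>
            rw [goB_get s i (d + e) h c hi hg, if_pos hop]
          · rw [show d + e + 1 = d + (e + 1) by ring]
            exact (ih _ hrec s (i+1) rfl d (e+1) h hd (by omega)).1 j hj
          · have := (ih _ hrec s (i+1) rfl d (e+1) h hd (by omega)).2 j hj
            rw [show d + e + 1 = d + (e + 1) by ring]; exact this
        · by_cases hcl : c = ')'
          · by_cases he1 : e = 1
            · subst he1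
              constructor <;> intro j hj <;>
                rw [goB_get s i 1 true c hi hg, if_neg hop, if_pos hcl,
                    if_neg (by omega), if_pos (by simp)] at hj <;>
                rw [goB_get s i (d + 1) h c hi hg, if_neg hop, if_pos hcl,
                    if_neg (by omega), if_neg (by simp; omega)]
              · exact absurd (congrArg (·.1) hj) (by simp)
              · have hj' := congrArg (·.2) hj; simp at hj'
                subst hj'
                rw [show d + 1 - 1 = d by ring]
            · constructor <;> intro j hj <;>
                rw [goB_get s i e true c hi hg, if_neg hop, if_pos hcl,
                    if_neg (by omega), if_neg (by simp; omega)] at hj <;>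
                rw [goB_get s i (d + e) h c hi hg, if_neg hop, if_pos hcl,
                    if_neg (by omega), if_neg (by simp; omega)]
              · rw [show d + e - 1 = d + (e - 1) by ring]
                exact (ih _ hrec s (i+1) rfl d (e-1) h hd (by omega)).1 j hj
              · have := (ih _ hrec s (i+1) rfl d (e-1) h hd (by omega)).2 j hj
                rw [show d + e - 1 = d + (e - 1) by ring]; exact this
          · constructor <;> intro j hj <;>
              rw [goB_get s i e true c hi hg, if_neg hop, if_neg hcl] at hj <;>
              rw [goB_get s i (d + e) h c hi hg, if_neg hop, if_neg hcl]
            · exact (ih _ hrec s (i+1) rfl d e h hd he).1 j hj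
            · exact (ih _ hrec s (i+1) rfl d e h hd he).2 j hj
    · constructor <;> intro j hj <;> rw [goB_end s i e true hi] at hj
      · rw [goB_end s i (d + e) h hi]
        rw [Prod.mk.injEq] at hj ⊢
        refine ⟨by simp; omega, hj.2⟩
      · have := congrArg (·.1) hj; simp at this; omega

-- equivalence of the two ports whenever A's port returns
theorem equivA : ∀ f : Nat, ∀ (s : List Char) (i : Int) (h : Bool) (r : Bool × Int),
    (goOuterA f s i h = some r → r = goB s i 0 h) ∧
    (goInnerA f s i h = some r → r = goB s i 1 h) := by
  intro f
  induction f with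
  | zero => intro s i h r; constructor <;> intro hc <;> simp [goOuterA, goInnerA] at hc
  | succ f ih =>
    intro s i h r
    constructor
    · intro hc
      by_cases hi : i < (s.length : Int)
      · cases hg : PySem.List.pyGet? s i with
        | none => rw [goOuterA_none f s i h hi hg] at hc; exact absurd hc (by simp)
        | some c =>
          rw [goOuterA_get f s i h c hi hg] at hc
          rw [goB_get s i 0 h c hi hg]
          by_cases hop : c = '('
          · rw [if_pos hop] at hc ⊢
            rw [show (0:Int) + 1 = 1 by ring]
            exact (ih s (i+1) h r).2 hc
          · by_cases hcl : c = ')'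
            · rw [if_neg hop, if_pos hcl] at hc ⊢
              rw [if_pos rfl]
              exact (Option.some.inj hc).symm
            · rw [if_neg hop, if_neg hcl] at hc ⊢
              exact (ih s (i+1) h r).1 hc
      · rw [goOuterA_end f s i h hi] at hc
        rw [goB_end s i 0 h hi]
        simpa using (Option.some.inj hc).symm
    · intro hc
      by_cases hi : i < (s.length : Int)
      · cases hg : PySem.List.pyGet? s i with
        | none => rw [goInnerA_none f s i h hi hg] at hc; exact absurd hc (by simp)
        | some c =>
          rw [goInnerA_get f s i h c hi hg] at hc
          rw [goB_get s i 1 h c hi hg]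
          by_cases hcl : c = ')'
          · have hop : ¬ c = '(' := by subst hcl; decide
            rw [if_pos hcl] at hc
            rw [if_neg hop, if_pos hcl, if_neg (by omega)]
            by_cases hh : h = true
            · rw [if_pos hh] at hc
              rw [if_pos (by simp [hh])]
              exact (Option.some.inj hc).symm
            · rw [if_neg hh] at hc
              rw [if_neg (by simp [hh])]
              rw [show (1 : Int) - 1 = 0 by ring]
              exact (ih s (i+1) h r).1 hc
          · by_cases hop : c = '('
            · rw [if_neg hcl, if_pos hop] at hc
              rw [if_pos hop]
              cases hg2 : goOuterA f s i true with
              | none => rw [hg2] at hc; exact absurd hc (by simp)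
              | some p =>
                rw [hg2] at hc
                obtain ⟨b, j⟩ := p
                have hsub : (b, j) = goB s i 0 true := (ih s i true (b, j)).1 hg2
                have hstep : goB s i 0 true = goB s (i+1) 1 true := by
                  rw [goB_get s i 0 true c hi hg, if_pos hop]
                  norm_num
                have hshift := shiftB ((s.length : Int) - (i+1)).toNat s (i+1) rfl 1 1 h le_rfl le_rfl
                cases b
                · have h2 : goB s (i+1) (1+1) h = goB s (j+1) 1 h :=
                    hshift.2 j (by rw [← hstep, ← hsub])
                  rw [show (1:Int) + 1 = 2 by ring] at h2
                  rw [show (1:Int) + 1 = 2 by ring, h2]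
                  exact (ih s (j+1) h r).2 hc
                · have h2 : goB s (i+1) (1+1) h = (true, j) :=
                    hshift.1 j (by rw [← hstep, ← hsub])
                  rw [show (1:Int) + 1 = 2 by ring] at h2
                  rw [show (1:Int) + 1 = 2 by ring, h2]
                  replace hc : some (true, j) = some r := hc
                  exact (Option.some.inj hc).symm
            · rw [if_neg hcl, if_neg hop] at hc
              rw [if_neg hop, if_neg hcl]
              exact (ih s (i+1) h r).2 hc
      · rw [goInnerA_end f s i h hi] at hc
        rw [goB_end s i 1 h hi]
        simpa using (Option.some.inj hc).symm

-- fuel sufficiency: with n = (len - i).toNat, fuel 2n+1 suffices for the outer loop and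
-- fuel 2n+2 for the inner loop, provided -len ≤ i (no IndexError is reached).
theorem fuelA : ∀ n : Nat, ∀ (s : List Char) (i : Int) (h : Bool),
    -(s.length : Int) ≤ i → ((s.length : Int) - i).toNat = n →
    (goOuterA (2 * n + 1) s i h).isSome ∧ (goInnerA (2 * n + 2) s i h).isSome := by
  intro n
  induction n using Nat.strong_induction_on with
  | _ n ih =>
    intro s i h hlo hn
    by_cases hi : i < (s.length : Int)
    · have hn1 : 1 ≤ n := by omega
      have hrec : ((s.length : Int) - (i + 1)).toNat = n - 1 := by omega
      cases hg : PySem.List.pyGet? s i with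
      | none =>
        exfalso
        rw [PySem.List.pyGet?_eq_none_iff] at hg
        exact hg ⟨by omega, by omega⟩
      | some c =>
        have hO : ∀ h0 : Bool, (goOuterA (2 * n + 1) s i h0).isSome := by
          intro h0
          rw [goOuterA_get (2 * n) s i h0 c hi hg]
          by_cases hop : c = '('
          · rw [if_pos hop]
            have := (ih (n - 1) (by omega) s (i + 1) h0 (by omega) hrec).2
            rw [show 2 * n = 2 * (n - 1) + 2 by omega]
            exact this
          · by_cases hcl : c = ')'
            · rw [if_neg hop, if_pos hcl]; rfl
            · rw [if_neg hop, if_neg hcl]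
              obtain ⟨r, hr⟩ := Option.isSome_iff_exists.mp
                ((ih (n - 1) (by omega) s (i + 1) h0 (by omega) hrec).1)
              rw [(monoA (2 * (n - 1) + 1) (2 * n) (by omega) s (i + 1) h0 r).1 hr]
              rfl
        refine ⟨hO h, ?_⟩
        rw [show 2 * n + 2 = (2 * n + 1) + 1 by rfl,
            goInnerA_get (2 * n + 1) s i h c hi hg]
        by_cases hcl : c = ')'
        · rw [if_pos hcl]
          by_cases hh : h = true
          · rw [if_pos hh]; rfl
          · rw [if_neg hh]
            obtain ⟨r, hr⟩ := Option.isSome_iff_exists.mp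
              ((ih (n - 1) (by omega) s (i + 1) h (by omega) hrec).1)
            rw [(monoA (2 * (n - 1) + 1) (2 * n + 1) (by omega) s (i + 1) h r).1 hr]
            rfl
        · by_cases hop : c = '('
          · rw [if_neg hcl, if_pos hop]
            obtain ⟨⟨b, j⟩, hr⟩ := Option.isSome_iff_exists.mp (hO true)
            rw [hr]
            cases b
            · show (goInnerA (2 * n + 1) s (j + 1) h).isSome = true
              have hij : i ≤ j := (idxA (2 * n + 1) s i true false j).1 hr
              have hm : ((s.length : Int) - (j + 1)).toNat ≤ n - 1 := by omega
              obtain ⟨r', hr'⟩ := Option.isSome_iff_exists.mp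
                ((ih (((s.length : Int) - (j + 1)).toNat) (by omega) s (j + 1) h
                  (by omega) rfl).2)
              rw [(monoA (2 * (((s.length : Int) - (j + 1)).toNat) + 2) (2 * n + 1)
                    (by omega) s (j + 1) h r').2 hr']
              rfl
            · rfl
          · rw [if_neg hcl, if_neg hop]
            obtain ⟨r, hr⟩ := Option.isSome_iff_exists.mp
              ((ih (n - 1) (by omega) s (i + 1) h (by omega) hrec).2)
            rw [(monoA (2 * (n - 1) + 2) (2 * n + 1) (by omega) s (i + 1) h r).2 hr]
            rfl
    · constructor
      · rw [goOuterA_end (2 * n) s i h hi]; rfl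
      · rw [show 2 * n + 2 = (2 * n + 1) + 1 by rfl, goInnerA_end (2 * n + 1) s i h hi]; rfl

-- ===== VERDICT (by name: the statement is the Claim_ definition above) =====
theorem check_mismatched_parenthesis_spec : Claim_equal_check_mismatched_parenthesis := by
  intro var_ref curr_index has_recurred _ hpre
  unfold Spec_check_mismatched_parenthesis check_mismatched_parenthesis check_mismatched_parenthesis_alt
  set s := var_ref.toList with hs
  have hpre' : -(s.length : Int) ≤ curr_index := hpre
  obtain ⟨hO, _⟩ := fuelA (((s.length : Int) - curr_index).toNat) s curr_index has_recurred hpre' rfl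
  obtain ⟨r, hr⟩ := Option.isSome_iff_exists.mp hO
  rw [hr]
  exact (equivA _ s curr_index has_recurred r).1 hr
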